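-- pv_equiv track=rewrite | github.com/MaitryG/Leetcode_Daily_2025 | 01_January/Week_1/Solution_Day_2_Problem_2559.py | vowelStrings
-- ===== SOURCE A (Python) =====
-- from typing import List
--
-- def vowelStrings(words: List[str], queries: List[List[int]]) -> List[int]:
--     strings = []
--     vowels = set({'a', 'e', 'i', 'o', 'u'})
--     c = 0
--     for i in range(len(words)):
--         string = words[i]
--         if string[0] in vowels and string[len(string) - 1] in vowels:
--             c += 1
--
--         strings.append(c)
--
--     res = []
--     for i in queries:
--         if i[0] == 0:
--             res.append(strings[i[1]])
--         else:
--             res.append(strings[i[1]] - strings[i[0] - 1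
--                                                ])
--     return res
-- ===== SOURCE B (Python) =====
-- from typing import List
--
-- def vowelStrings(words: List[str], queries: List[List[int]]) -> List[int]:
--     vowels = set('aeiou')
--     flag = [1 if w[0] in vowels and w[-1] in vowels else 0 for w in words]
--
--     def upto(j):
--         # vowel-bounded words among words[:j+1] (inclusive slice, Python index rules)
--         return sum(flag[:j + 1 or None])
--
--     return [upto(q[1]) - (upto(q[0] - 1) if q[0] else 0) for q in queries]
-- ===== Notes on version B (the rewrite author's own statement) =====
-- stated objective: simpler
-- what changed: B drops A's cumulative prefix-sum table entirely: it keeps only a plain 0/1 flag list and answers each query by summing inclusive slices flag[:j+1 or None] of it, re-scanning per query instead of looking up a precomputed table.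
import Mathlib
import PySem

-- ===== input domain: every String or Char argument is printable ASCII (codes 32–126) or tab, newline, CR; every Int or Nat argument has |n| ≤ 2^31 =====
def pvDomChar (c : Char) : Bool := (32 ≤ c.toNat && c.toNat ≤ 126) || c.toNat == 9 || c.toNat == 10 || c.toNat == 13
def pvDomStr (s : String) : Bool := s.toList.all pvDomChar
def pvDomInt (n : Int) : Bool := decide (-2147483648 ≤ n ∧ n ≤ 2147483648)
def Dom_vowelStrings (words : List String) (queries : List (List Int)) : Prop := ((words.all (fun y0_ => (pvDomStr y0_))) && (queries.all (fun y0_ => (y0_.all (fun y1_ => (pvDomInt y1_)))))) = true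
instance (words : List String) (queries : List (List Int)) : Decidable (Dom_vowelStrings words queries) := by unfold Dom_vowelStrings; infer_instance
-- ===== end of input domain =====

-- B drops A's cumulative prefix-sum table: it keeps only a 0/1 flag list and answers each
-- query by summing inclusive slices of it (simpler decomposition, same return values).

-- ===== PORT A =====
def vowelStrings (words : List String) (queries : List (List Int)) : List Int :=
  let vowels : PySem.Set Char := PySem.Set.ofList ['a', 'e', 'i', 'o', 'u']
  let st :=
    (PySem.List.pyRange 0 (PySem.List.len words) 1).foldl
      (fun (acc : List Int × Int) i =>
        let string := PySem.List.pyGetD words i ""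
        let c :=
          if ((PySem.Str.pyGet? string 0).elim false (fun ch => PySem.Set.contains vowels ch))
              && ((PySem.Str.pyGet? string (PySem.Str.len string - 1)).elim false
                    (fun ch => PySem.Set.contains vowels ch))
          then acc.2 + 1 else acc.2
        (acc.1 ++ [c], c))
      ([], 0)
  let strings := st.1
  queries.foldl
    (fun res i =>
      if PySem.List.pyGetD i 0 0 = 0 then
        res ++ [PySem.List.pyGetD strings (PySem.List.pyGetD i 1 0) 0]
      else
        res ++ [PySem.List.pyGetD strings (PySem.List.pyGetD i 1 0) 0
                  - PySem.List.pyGetD strings (PySem.List.pyGetD i 0 0 - 1) 0])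
    []

-- ===== PORT B =====
def vowelStrings_alt (words : List String) (queries : List (List Int)) : List Int :=
  let vowels : PySem.Set Char := PySem.Set.ofList "aeiou".toList
  let flag := words.map (fun w =>
    if ((PySem.Str.pyGet? w 0).elim false (fun ch => PySem.Set.contains vowels ch))
        && ((PySem.Str.pyGet? w (-1)).elim false (fun ch => PySem.Set.contains vowels ch))
    then (1 : Int) else 0)
  -- flag[:j+1 or None]  (inclusive slice; 'or None' keeps j = -1 meaning 'to the end')
  let upto := fun (j : Int) =>
    (PySem.List.slice flag none (if j + 1 = 0 then none else some (j + 1))).sum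
  queries.map (fun q =>
    upto (PySem.List.pyGetD q 1 0) -
      (if PySem.List.pyGetD q 0 0 ≠ 0 then upto (PySem.List.pyGetD q 0 0 - 1) else 0))

-- ===== PRECONDITION & SPEC =====
-- Pre_ excludes exactly the inputs on which A raises: an empty word (IndexError on w[0]),
-- a query of length < 2 (IndexError on q[1]), or a query index outside Python's accepted
-- range for the prefix table (strings[q[1]], and strings[q[0]-1] when q[0] != 0).
def Pre_vowelStrings (words : List String) (queries : List (List Int)) : Prop :=
  (∀ w ∈ words, w.toList ≠ []) ∧
  ∀ q ∈ queries, 2 ≤ q.length ∧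
    (-(words.length : Int) ≤ q.getD 1 0 ∧ q.getD 1 0 < (words.length : Int)) ∧
    (q.getD 0 0 = 0 ∨
      (-(words.length : Int) ≤ q.getD 0 0 - 1 ∧ q.getD 0 0 - 1 < (words.length : Int)))
instance (words : List String) (queries : List (List Int)) : Decidable (Pre_vowelStrings words queries) := by unfold Pre_vowelStrings; infer_instance

def pvWitness_vowelStrings : List String × List (List Int) := (["ab", "ea"], [[0, 1], [1, -1]])

def Spec_vowelStrings (words : List String) (queries : List (List Int)) (out : List Int) : Prop := out = vowelStrings_alt words queries
instance (words : List String) (queries : List (List Int)) (out : List Int) : Decidable (Spec_vowelStrings words queries out) := by unfold Spec_vowelStrings; infer_instance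

-- ===== CLAIM (what is proved, stated in full; the proofs are below) =====
def Claim_equal_vowelStrings : Prop := ∀ (words : List String) (queries : List (List Int)), Dom_vowelStrings words queries → Pre_vowelStrings words queries → Spec_vowelStrings words queries (vowelStrings words queries)

-- ===== LEMMAS AND PROOFS =====

-- the vowel test both programs apply to a word (w[0] and w[-1] both vowels)
def pvHit (w : String) : Bool :=
  ((PySem.Str.pyGet? w 0).elim false
      (fun ch => PySem.Set.contains (PySem.Set.ofList ['a', 'e', 'i', 'o', 'u']) ch))
    && ((PySem.Str.pyGet? w (-1)).elim false
      (fun ch => PySem.Set.contains (PySem.Set.ofList ['a', 'e', 'i', 'o', 'u']) ch))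

def pvFlag (w : String) : Int := if pvHit w then 1 else 0

-- the list of running counters A appends (second argument: counter so far)
def pvPref : List String → Int → List Int
  | [], _ => []
  | w :: ws, c => (c + pvFlag w) :: pvPref ws (c + pvFlag w)

-- w[len(w) - 1] and w[-1] are the same character access (both none on the empty string)
theorem pvHit_lastIdx (w : String) :
    PySem.Str.pyGet? w (PySem.Str.len w - 1) = PySem.Str.pyGet? w (-1) := by
  simp only [PySem.Str.pyGet?_eq, PySem.Str.len_eq]
  rcases List.eq_nil_or_concat w.toList with h | ⟨ys, y, h⟩
  · rw [h]; rfl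
  · rw [h]
    show PySem.List.pyGet? (ys.concat y) (((ys.concat y).length : Int) - 1)
        = PySem.List.pyGet? (ys.concat y) (-1)
    have h1 : (((ys.concat y).length : Int) - 1) = ((ys.length : Nat) : Int) := by simp
    rw [h1, PySem.List.pyGet?_natCast, PySem.List.pyGet?_neg_one]
    simp [List.concat_eq_append]

theorem pvStep (c : Int) (w : String) :
    (if ((PySem.Str.pyGet? w 0).elim false
            (fun ch => PySem.Set.contains (PySem.Set.ofList ['a', 'e', 'i', 'o', 'u']) ch))
          && ((PySem.Str.pyGet? w (PySem.Str.len w - 1)).elim false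
                (fun ch => PySem.Set.contains (PySem.Set.ofList ['a', 'e', 'i', 'o', 'u']) ch))
      then c + 1 else c) = c + pvFlag w := by
  rw [pvHit_lastIdx]
  change (if pvHit w then c + 1 else c) = c + pvFlag w
  unfold pvFlag
  cases pvHit w <;> simp

theorem pvFold_eq (ws : List String) (acc : List Int) (c : Int) :
    (ws.foldl
      (fun (acc : List Int × Int) string =>
        let c :=
          if ((PySem.Str.pyGet? string 0).elim false
                (fun ch => PySem.Set.contains (PySem.Set.ofList ['a', 'e', 'i', 'o', 'u']) ch))
              && ((PySem.Str.pyGet? string (PySem.Str.len string - 1)).elim false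
                    (fun ch => PySem.Set.contains (PySem.Set.ofList ['a', 'e', 'i', 'o', 'u']) ch))
          then acc.2 + 1 else acc.2
        (acc.1 ++ [c], c))
      (acc, c)).1 = acc ++ pvPref ws c := by
  induction ws generalizing acc c with
  | nil => simp [pvPref]
  | cons w ws ih =>
    simp only [List.foldl_cons, pvPref]
    rw [pvStep c w] at *
    rw [ih]
    simp

theorem pvPref_getD (ws : List String) (c : Int) (j : Nat) (hj : j < ws.length) :
    (pvPref ws c).getD j 0 = c + ((ws.take (j + 1)).map pvFlag).sum := by
  induction ws generalizing c j with
  | nil => simp at hj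
  | cons w ws ih =>
    cases j with
    | zero => simp [pvPref]
    | succ j =>
      simp only [pvPref, List.getD_cons_succ, List.take_succ_cons, List.map_cons, List.sum_cons]
      rw [ih _ j (by simpa using hj)]
      ring

theorem pvPref_length (ws : List String) (c : Int) : (pvPref ws c).length = ws.length := by
  induction ws generalizing c with
  | nil => rfl
  | cons w ws ih => simp [pvPref, ih]

-- lookup in A's prefix table at a possibly negative in-range index
theorem pvLookup (words : List String) (i : Int)
    (h1 : -(words.length : Int) ≤ i) (h2 : i < (words.length : Int)) :
    PySem.List.pyGetD (pvPref words 0) i 0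
      = ((words.take ((if 0 ≤ i then i else (words.length : Int) + i).toNat + 1)).map pvFlag).sum := by
  by_cases h0 : 0 ≤ i
  · rw [if_pos h0]
    rw [PySem.List.pyGetD_eq_getElem _ 0 h0 (by rw [pvPref_length]; exact h2)]
    rw [← List.getD_eq_getElem _ 0, pvPref_getD _ _ _ (by omega)]
    ring
  · rw [if_neg h0]
    have hk : i = -(((-i).toNat : Nat) : Int) := by omega
    rw [hk, PySem.List.pyGetD_neg_natCast _ _ _ (by omega) (by rw [pvPref_length]; omega)]
    rw [← List.getD_eq_getElem _ 0, pvPref_getD _ _ _ (by rw [pvPref_length]; omega)]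
    have : (pvPref words 0).length - (-i).toNat + 1
        = ((words.length : Int) + -(((-i).toNat : Nat) : Int)).toNat + 1 := by
      rw [pvPref_length]; omega
    rw [this]
    ring

-- B's inclusive slice sum equals A's table lookup at every in-range index
theorem pvUpto (words : List String) (i : Int)
    (h1 : -(words.length : Int) ≤ i) (h2 : i < (words.length : Int)) :
    (PySem.List.slice (words.map pvFlag) none (if i + 1 = 0 then none else some (i + 1))).sum
      = PySem.List.pyGetD (pvPref words 0) i 0 := by
  rw [pvLookup words i h1 h2, List.map_take]
  by_cases hi0 : i + 1 = 0
  · rw [if_pos hi0, PySem.List.slice_none_none]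
    have : (if 0 ≤ i then i else (words.length : Int) + i).toNat + 1 = (words.map pvFlag).length := by
      simp only [List.length_map]
      split_ifs <;> omega
    rw [this, List.take_length]
  · rw [if_neg hi0]
    by_cases h0 : 0 ≤ i
    · have he : (i + 1).toNat = (if 0 ≤ i then i else (words.length : Int) + i).toNat + 1 := by
        split_ifs; omega
      rw [PySem.List.slice_to _ (by omega), he]
    · have hk : i + 1 = -((-(i + 1)).toNat : Int) := by omega
      rw [hk, PySem.List.slice_to_neg_natCast _ _ (by omega)]
      have hlm : (words.map pvFlag).length = words.length := by simp
      have he : (words.map pvFlag).length - (-(i + 1)).toNat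
          = (if 0 ≤ i then i else (words.length : Int) + i).toNat + 1 := by
        rw [hlm]; split_ifs; omega
      rw [he]

-- per-query agreement on every exception-free query
theorem pvQuery (words : List String) (q : List Int)
    (hr1 : -(words.length : Int) ≤ q.getD 1 0) (hr2 : q.getD 1 0 < (words.length : Int))
    (hl : q.getD 0 0 = 0 ∨ (-(words.length : Int) ≤ q.getD 0 0 - 1 ∧ q.getD 0 0 - 1 < (words.length : Int))) :
    (if PySem.List.pyGetD q 0 0 = 0 then
       PySem.List.pyGetD (pvPref words 0) (PySem.List.pyGetD q 1 0) 0
     else PySem.List.pyGetD (pvPref words 0) (PySem.List.pyGetD q 1 0) 0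
          - PySem.List.pyGetD (pvPref words 0) (PySem.List.pyGetD q 0 0 - 1) 0)
    = (PySem.List.slice (words.map pvFlag) none
          (if PySem.List.pyGetD q 1 0 + 1 = 0 then none else some (PySem.List.pyGetD q 1 0 + 1))).sum
      - (if PySem.List.pyGetD q 0 0 ≠ 0 then
          (PySem.List.slice (words.map pvFlag) none
            (if PySem.List.pyGetD q 0 0 - 1 + 1 = 0 then none
             else some (PySem.List.pyGetD q 0 0 - 1 + 1))).sum
         else 0) := by
  have hq0 : PySem.List.pyGetD q 0 0 = q.getD 0 0 := PySem.List.pyGetD_zero q 0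
  have hq1 : PySem.List.pyGetD q 1 0 = q.getD 1 0 := by
    simpa using PySem.List.pyGetD_natCast q 1 0
  rw [hq0, hq1, pvUpto words (q.getD 1 0) hr1 hr2]
  by_cases hc : q.getD 0 0 = 0
  · rw [if_pos hc, if_neg (by simpa using hc)]
    ring
  · have hbl : -(words.length : Int) ≤ q.getD 0 0 - 1 ∧ q.getD 0 0 - 1 < (words.length : Int) := by
      rcases hl with h | h
      · exact absurd h hc
      · exact h
    rw [if_neg hc, if_pos hc, pvUpto words (q.getD 0 0 - 1) hbl.1 hbl.2]

theorem pvFoldl_append_ite {α β : Type} (p : α → Prop) [DecidablePred p] (f g : α → β)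
    (l : List α) (acc : List β) :
    l.foldl (fun acc x => if p x then acc ++ [f x] else acc ++ [g x]) acc
      = acc ++ l.map (fun x => if p x then f x else g x) := by
  induction l generalizing acc with
  | nil => simp
  | cons x l ih => by_cases h : p x <;> simp [h, ih]

-- ===== VERDICT (by name: the statement is the Claim_ definition above) =====
theorem vowelStrings_spec : Claim_equal_vowelStrings := by
  intro words queries _hdom hpre
  obtain ⟨hw, hq⟩ := hpre
  have hfold :
      ((PySem.List.pyRange 0 (PySem.List.len words) 1).foldl
        (fun (acc : List Int × Int) i =>
          let string := PySem.List.pyGetD words i ""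
          let c :=
            if ((PySem.Str.pyGet? string 0).elim false
                  (fun ch => PySem.Set.contains (PySem.Set.ofList ['a', 'e', 'i', 'o', 'u']) ch))
                && ((PySem.Str.pyGet? string (PySem.Str.len string - 1)).elim false
                      (fun ch => PySem.Set.contains (PySem.Set.ofList ['a', 'e', 'i', 'o', 'u']) ch))
            then acc.2 + 1 else acc.2
          (acc.1 ++ [c], c))
        ([], 0)).1 = pvPref words 0 := by
    rw [PySem.List.foldl_pyRange_zero_pyGetD words ""
      (fun (acc : List Int × Int) string =>
        let c :=
          if ((PySem.Str.pyGet? string 0).elim false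
                (fun ch => PySem.Set.contains (PySem.Set.ofList ['a', 'e', 'i', 'o', 'u']) ch))
              && ((PySem.Str.pyGet? string (PySem.Str.len string - 1)).elim false
                    (fun ch => PySem.Set.contains (PySem.Set.ofList ['a', 'e', 'i', 'o', 'u']) ch))
          then acc.2 + 1 else acc.2
        (acc.1 ++ [c], c)) ([], 0)]
    simpa using pvFold_eq words [] 0
  unfold Spec_vowelStrings
  simp only [vowelStrings, vowelStrings_alt]
  rw [hfold]
  rw [pvFoldl_append_ite (fun i => PySem.List.pyGetD i 0 0 = 0)
    (fun i => PySem.List.pyGetD (pvPref words 0) (PySem.List.pyGetD i 1 0) 0)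
    (fun i => PySem.List.pyGetD (pvPref words 0) (PySem.List.pyGetD i 1 0) 0
        - PySem.List.pyGetD (pvPref words 0) (PySem.List.pyGetD i 0 0 - 1) 0)]
  simp only [List.nil_append]
  have hflag : (words.map (fun w =>
      if ((PySem.Str.pyGet? w 0).elim false
            (fun ch => PySem.Set.contains (PySem.Set.ofList "aeiou".toList) ch))
          && ((PySem.Str.pyGet? w (-1)).elim false
            (fun ch => PySem.Set.contains (PySem.Set.ofList "aeiou".toList) ch))
      then (1 : Int) else 0)) = words.map pvFlag := rfl
  rw [hflag]
  apply List.map_congr_left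
  intro q hmem
  obtain ⟨_, ⟨hr1, hr2⟩, hlc⟩ := hq q hmem
  exact pvQuery words q hr1 hr2 hlc
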